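-- pv_equiv track=rewrite | github.com/SGArchipel/Archipelmailer | ArchipelMailer.py | generate_email_variations
-- ===== SOURCE A (Python) =====
-- def generate_email_variations(email):
--     variations = set()
--     parts = email.split('@')
--     local_part = parts[0]
--     domain_part = parts[1]
--
--     def generate_variations_with_dots(part):
--         result = [part[:i] + "." + part[i:] for i in range(len(part))]
--         return result
--
--     def generate_variations_with_two_dots(part):
--         result = [part[:i] + "." + part[i:j] + "." + part[j:] for i in range(len(part) - 1) for j in range(i + 1, len(part))]
--         return result
--
--     local_part_variations = generate_variations_with_dots(local_part) + generate_variations_with_two_dots(local_part)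
--
--     for variation in local_part_variations:
--         variations.add(f"{variation}@{domain_part}")
--         variations.add(f"{variation}@googlemail.com")
--
--     # add variation without dots
--     variation_without_dot = local_part.replace('.', '')
--     variations.add(f"{variation_without_dot}@{domain_part}")
--     variations.add(f"{variation_without_dot}@googlemail.com")
--     variations.add(f"{local_part}@googlemail.com")
--
--     return variations
-- ===== SOURCE B (Python) =====
-- def _combos(items, r):
--     # all r-element combinations of items, in index-lexicographic order
--     if r == 0:
--         return [[]]
--     if not items:
--         return []
--     head, tail = items[0], items[1:]
--     return [[head] + rest for rest in _combos(tail, r - 1)] + _combos(tail, r)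
--
--
-- def generate_email_variations(email):
--     parts = email.split('@')
--     local_part = parts[0]
--     domain_part = parts[1]
--
--     local_part_variations = []
--     for r in (1, 2):
--         for combo in _combos(list(range(len(local_part))), r):
--             pieces = []
--             prev = 0
--             for idx in combo:
--                 pieces.append(local_part[prev:idx])
--                 prev = idx
--             pieces.append(local_part[prev:])
--             local_part_variations.append('.'.join(pieces))
--
--     variations = set()
--     for variation in local_part_variations:
--         variations.add(f"{variation}@{domain_part}")
--         variations.add(f"{variation}@googlemail.com")
--
--     variation_without_dot = local_part.replace('.', '')
--     variations.add(f"{variation_without_dot}@{domain_part}")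
--     variations.add(f"{variation_without_dot}@googlemail.com")
--     variations.add(f"{local_part}@googlemail.com")
--
--     return variations
-- ===== Notes on version B (the rewrite author's own statement) =====
-- stated objective: alternative
-- what changed: A's two separate dot-insertion comprehensions (one-dot and nested two-dot slices) are replaced by a single combinations-of-positions generator (recursive r-combinations of range(len(local_part))) whose chosen positions are spliced back with a pieces/prev loop and '.'.join; the split, no-dot and googlemail decoration stay.
import Mathlib
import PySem

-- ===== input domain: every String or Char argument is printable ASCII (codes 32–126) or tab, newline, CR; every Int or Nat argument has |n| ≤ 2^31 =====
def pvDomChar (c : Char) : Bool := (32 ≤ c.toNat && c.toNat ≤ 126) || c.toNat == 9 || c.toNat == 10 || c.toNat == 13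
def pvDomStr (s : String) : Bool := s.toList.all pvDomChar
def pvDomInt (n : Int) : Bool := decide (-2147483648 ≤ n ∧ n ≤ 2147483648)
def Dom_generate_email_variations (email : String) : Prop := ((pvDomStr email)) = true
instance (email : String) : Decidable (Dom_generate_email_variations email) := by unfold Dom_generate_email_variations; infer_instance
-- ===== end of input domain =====

-- B replaces A's two dot-insertion comprehensions with a combinations-of-positions
-- generator plus a slice-splicing join (objective: alternative decomposition, same cost).
-- Both programs return a Python set; it is modelled as a PySem.Set built in insertion
-- order, and strings are handled on the List Char side (String.ofList applied on return).

-- ===== PORT A =====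
def pvGmail : List Char := '@' :: "googlemail.com".toList

-- [part[:i] + "." + part[i:] for i in range(len(part))]
def pvGenDots1 (part : List Char) : List (List Char) :=
  (PySem.List.pyRange 0 (PySem.List.len part) 1).map
    (fun i => PySem.List.slice part none (some i) ++ '.' :: PySem.List.slice part (some i) none)

-- [part[:i] + "." + part[i:j] + "." + part[j:] for i in range(len(part)-1) for j in range(i+1, len(part))]
def pvGenDots2 (part : List Char) : List (List Char) :=
  (PySem.List.pyRange 0 (PySem.List.len part - 1) 1).flatMap
    (fun i => (PySem.List.pyRange (i + 1) (PySem.List.len part) 1).map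
      (fun j => PySem.List.slice part none (some i) ++
        '.' :: PySem.List.slice part (some i) (some j) ++
        '.' :: PySem.List.slice part (some j) none))

def generate_email_variations (email : String) : List String :=
  let parts := (PySem.Chars.split? email.toList ['@']).getD []
  let local_part := PySem.List.pyGetD parts 0 []      -- parts[0]
  let domain_part := PySem.List.pyGetD parts 1 []     -- parts[1]; Pre_ guarantees it exists
  let lpv := pvGenDots1 local_part ++ pvGenDots2 local_part
  let variations : PySem.Set (List Char) :=
    lpv.foldl (fun s v =>
      PySem.Set.add (PySem.Set.add s (v ++ '@' :: domain_part)) (v ++ pvGmail))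
      PySem.Set.empty
  let nodot := PySem.Chars.replace local_part ['.'] []
  let variations :=
    PySem.Set.add (PySem.Set.add (PySem.Set.add variations
      (nodot ++ '@' :: domain_part)) (nodot ++ pvGmail)) (local_part ++ pvGmail)
  variations.map String.ofList

-- ===== PORT B =====
-- _combos(items, r) of Source B, literally (structural recursion on items)
def pvCombos (items : List Int) (r : Nat) : List (List Int) :=
  match r, items with
  | 0, _ => [[]]
  | _ + 1, [] => []
  | r + 1, head :: tail =>
      (pvCombos tail r).map (fun rest => head :: rest) ++ pvCombos tail (r + 1)

-- the pieces/prev loop plus '.'.join of Source B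
def pvSplice (part : List Char) (combo : List Int) : List Char :=
  let st := combo.foldl (fun (acc : List (List Char) × Int) idx =>
      (acc.1 ++ [PySem.List.slice part (some acc.2) (some idx)], idx)) ([], 0)
  PySem.Chars.join ['.'] (st.1 ++ [PySem.List.slice part (some st.2) none])

def generate_email_variations_alt (email : String) : List String :=
  let parts := (PySem.Chars.split? email.toList ['@']).getD []
  let local_part := PySem.List.pyGetD parts 0 []
  let domain_part := PySem.List.pyGetD parts 1 []
  let lpv := ([1, 2] : List Nat).flatMap (fun r =>
      (pvCombos (PySem.List.pyRange 0 (PySem.List.len local_part) 1) r).map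
        (pvSplice local_part))
  let variations : PySem.Set (List Char) :=
    lpv.foldl (fun s v =>
      PySem.Set.add (PySem.Set.add s (v ++ '@' :: domain_part)) (v ++ pvGmail))
      PySem.Set.empty
  let nodot := PySem.Chars.replace local_part ['.'] []
  let variations :=
    PySem.Set.add (PySem.Set.add (PySem.Set.add variations
      (nodot ++ '@' :: domain_part)) (nodot ++ pvGmail)) (local_part ++ pvGmail)
  variations.map String.ofList

-- ===== PRECONDITION & SPEC =====
-- Python A evaluates parts[1] and raises IndexError iff email contains no '@'.
def Pre_generate_email_variations (email : String) : Prop :=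
  PySem.Str.isIn "@" email = true
instance (email : String) : Decidable (Pre_generate_email_variations email) := by
  unfold Pre_generate_email_variations; infer_instance

def pvWitness_generate_email_variations : String := "a.b@example.com"

def Spec_generate_email_variations (email : String) (out : List String) : Prop :=
  out = generate_email_variations_alt email
instance (email : String) (out : List String) : Decidable (Spec_generate_email_variations email out) := by
  unfold Spec_generate_email_variations; infer_instance

-- ===== CLAIM (what is proved, stated in full; the proofs are below) =====
def Claim_equal_generate_email_variations : Prop :=
  ∀ (email : String), Dom_generate_email_variations email →
    Pre_generate_email_variations email →
    Spec_generate_email_variations email (generate_email_variations email)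

-- ===== LEMMAS AND PROOFS =====
theorem pvCombos_one (xs : List Int) : pvCombos xs 1 = xs.map (fun x => [x]) := by
  induction xs with
  | nil => rfl
  | cons x t ih => simp [pvCombos, ih]

theorem pvSplice_one (part : List Char) (i : Int) :
    pvSplice part [i] =
      PySem.List.slice part none (some i) ++ '.' :: PySem.List.slice part (some i) none := by
  simp [pvSplice, PySem.Chars.join, List.intercalate, List.intersperse]

theorem pvSplice_two (part : List Char) (i j : Int) :
    pvSplice part [i, j] =
      PySem.List.slice part none (some i) ++
        '.' :: PySem.List.slice part (some i) (some j) ++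
        '.' :: PySem.List.slice part (some j) none := by
  simp [pvSplice, PySem.Chars.join, List.intercalate, List.intersperse]

theorem pvCombos_two_range (n : Nat) : ∀ (a b : Int), (b - a).toNat ≤ n →
    pvCombos (PySem.List.pyRange a b 1) 2 =
      (PySem.List.pyRange a (b - 1) 1).flatMap
        (fun i => (PySem.List.pyRange (i + 1) b 1).map (fun j => [i, j])) := by
  induction n with
  | zero =>
    intro a b h
    have hba : b ≤ a := by omega
    rw [PySem.List.pyRange_one_eq_nil hba, PySem.List.pyRange_one_eq_nil (by omega)]
    rfl
  | succ n ih =>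
    intro a b h
    by_cases hba : b ≤ a
    · rw [PySem.List.pyRange_one_eq_nil hba, PySem.List.pyRange_one_eq_nil (by omega)]
      rfl
    · push Not at hba
      rw [PySem.List.pyRange_one_cons hba]
      by_cases h1 : b ≤ a + 1
      · -- the range is the singleton [a]
        rw [PySem.List.pyRange_one_eq_nil h1, PySem.List.pyRange_one_eq_nil (show b - 1 ≤ a by omega)]
        rfl
      · push Not at h1
        rw [show pvCombos (a :: PySem.List.pyRange (a + 1) b 1) 2 =
              (pvCombos (PySem.List.pyRange (a + 1) b 1) 1).map (fun rest => a :: rest) ++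
              pvCombos (PySem.List.pyRange (a + 1) b 1) 2 from rfl,
            pvCombos_one, ih (a + 1) b (by omega),
            PySem.List.pyRange_one_cons (show a < b - 1 by omega)]
        simp [List.map_map, Function.comp]

-- the heart of the equivalence: B's combination generator reproduces A's two comprehensions
theorem pvLpv_eq (part : List Char) :
    ([1, 2] : List Nat).flatMap (fun r =>
        (pvCombos (PySem.List.pyRange 0 (PySem.List.len part) 1) r).map (pvSplice part)) =
      pvGenDots1 part ++ pvGenDots2 part := by
  have h2 := pvCombos_two_range (PySem.List.len part - 0).toNat 0 (PySem.List.len part) le_rfl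
  simp only [List.flatMap_cons, List.flatMap_nil, List.append_nil, pvCombos_one, h2,
    pvGenDots1, pvGenDots2, List.map_map, List.map_flatMap]
  congr 1
  · simp [Function.comp_def, pvSplice_one]
  · simp [Function.comp_def, pvSplice_two]

-- ===== VERDICT (by name: the statement is the Claim_ definition above) =====
theorem generate_email_variations_spec : Claim_equal_generate_email_variations := by
  intro email _ _
  unfold Spec_generate_email_variations generate_email_variations generate_email_variations_alt
  simp only [pvLpv_eq]
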